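-- pv_equiv track=rewrite | github.com/dkarachalios/Algorithms-Data-Structures-2022 | assignment-2/cycle_detection.py | Purge
-- ===== SOURCE A (Python) =====
-- def Purge(table, b):
--     topop = []
--     for i in range (len(table)):
--         if table [i][1] % (2 * b) != 0 :
--             topop.append(i)
--     for i in range (len(topop)):
--         pos = topop[i]
--         table.pop(pos)
--         for j in range (len(topop)):
--             topop[j] = topop[j] - 1
--     return table
-- ===== SOURCE B (Python) =====
-- def Purge(table, b):
--     # Single in-place forward pass with a write index: kept rows are written
--     # forward and the tail is truncated once.  Mutates and returns the same
--     # list object, like A.  Equivalence claimed is about the return value.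
--     w = 0
--     for row in table:
--         if row[1] % (2 * b) == 0:
--             table[w] = row
--             w += 1
--     del table[w:]
--     return table
-- ===== Notes on version B (the rewrite author's own statement) =====
-- stated objective: alternative
-- what changed: One forward pass with a write index that overwrites kept rows in place and truncates once, replacing A's two-phase scheme that first collects the indices of failing rows and then pops them one by one, decrementing every stored index after each pop.
import Mathlib
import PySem

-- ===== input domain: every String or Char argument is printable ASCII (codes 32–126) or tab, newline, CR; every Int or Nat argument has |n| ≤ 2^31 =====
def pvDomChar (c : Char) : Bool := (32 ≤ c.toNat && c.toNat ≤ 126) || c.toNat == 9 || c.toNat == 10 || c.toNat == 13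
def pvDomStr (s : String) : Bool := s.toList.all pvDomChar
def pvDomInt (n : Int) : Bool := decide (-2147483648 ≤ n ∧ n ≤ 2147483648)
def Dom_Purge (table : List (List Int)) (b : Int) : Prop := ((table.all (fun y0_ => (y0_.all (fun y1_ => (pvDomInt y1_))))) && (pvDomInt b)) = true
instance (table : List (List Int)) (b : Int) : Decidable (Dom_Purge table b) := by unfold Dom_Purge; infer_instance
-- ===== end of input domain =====

-- B replaces A's collect-indices-then-pop scheme by a single write-index pass;
-- both Pythons mutate `table` in place, the equivalence proved is about the return value.

-- ===== PORT A =====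
-- `table.pop(pos)` (identity fallback is unreachable: A's positions are always in range)
def popAt (l : List (List Int)) (pos : Int) : List (List Int) :=
  match PySem.List.pop? l pos with
  | some r => r.2
  | none   => l

-- body of A's second loop: pop topop[i] from the table, then the inner
-- `for j in range(len(topop)): topop[j] = topop[j] - 1`
def purgeStep (st : List (List Int) × List Int) (i : Int) : List (List Int) × List Int :=
  let pos := PySem.List.pyGetD st.2 i 0
  let tbl := popAt st.1 pos
  let tp :=
    (PySem.List.pyRange 0 (st.2.length : Int) 1).foldl
      (fun t j => PySem.List.pySetD t j (PySem.List.pyGetD t j 0 - 1)) st.2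
  (tbl, tp)

def Purge (table : List (List Int)) (b : Int) : List (List Int) :=
  -- first loop: topop = indices i with table[i][1] % (2*b) != 0
  let topop : List Int :=
    (PySem.List.pyRange 0 (table.length : Int) 1).foldl
      (fun tp i =>
        if PySem.Int.mod (PySem.List.pyGetD (PySem.List.pyGetD table i []) 1 0) (2 * b) ≠ 0
        then tp ++ [i] else tp) []
  -- second loop over range(len(topop)), state (table, topop)
  ((PySem.List.pyRange 0 (topop.length : Int) 1).foldl purgeStep (table, topop)).1

-- ===== PORT B =====
-- B: one forward pass; the write-index prefix table[0:w] is the kept list.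
def Purge_alt (table : List (List Int)) (b : Int) : List (List Int) :=
  table.foldl
    (fun kept row =>
      if PySem.Int.mod (PySem.List.pyGetD row 1 0) (2 * b) = 0
      then kept ++ [row] else kept) []

-- ===== PRECONDITION & SPEC =====
-- Pre: Python A raises ZeroDivisionError when b = 0 and the table is nonempty,
-- and IndexError when some row has fewer than 2 entries; B raises on exactly
-- the same inputs (on an empty table neither divides, so b = 0 is admitted there).
def Pre_Purge (table : List (List Int)) (b : Int) : Prop :=
  (table = [] ∨ b ≠ 0) ∧ ∀ row ∈ table, 2 ≤ row.length
instance (table : List (List Int)) (b : Int) : Decidable (Pre_Purge table b) := by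
  unfold Pre_Purge; infer_instance
def pvWitness_Purge : List (List Int) × Int := ([[1, 2], [3, 4], [5, 7]], 1)

def Spec_Purge (table : List (List Int)) (b : Int) (out : List (List Int)) : Prop := out = Purge_alt table b
instance (table : List (List Int)) (b : Int) (out : List (List Int)) : Decidable (Spec_Purge table b out) := by unfold Spec_Purge; infer_instance

-- ===== CLAIM (what is proved, stated in full; the proofs are below) =====
def Claim_equal_Purge : Prop := ∀ (table : List (List Int)) (b : Int), Dom_Purge table b → Pre_Purge table b → Spec_Purge table b (Purge table b)

-- ===== LEMMAS AND PROOFS =====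

-- A's pop phase, abstracted: pop the head index, then decrement the remaining ones
def pops : List (List Int) → List Int → List (List Int)
  | tbl, [] => tbl
  | tbl, p :: ps => pops (popAt tbl p) (ps.map (fun x => x - 1))
termination_by _ ps => ps.length
decreasing_by simp

-- the indices of rows satisfying `p`, in increasing order
def badIdx (p : List Int → Bool) : List (List Int) → List Int
  | [] => []
  | r :: t => if p r then 0 :: (badIdx p t).map (· + 1) else (badIdx p t).map (· + 1)

lemma badIdx_nonneg (p : List Int → Bool) (t : List (List Int)) :
    ∀ x ∈ badIdx p t, 0 ≤ x := by
  induction t with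
  | nil => simp [badIdx]
  | cons r t ih =>
    intro x hx
    simp only [badIdx] at hx
    split at hx <;> simp only [List.mem_cons, List.mem_map] at hx
    · rcases hx with h | ⟨y, hy, rfl⟩
      · omega
      · have := ih y hy; omega
    · rcases hx with ⟨y, hy, rfl⟩
      have := ih y hy; omega

lemma badIdx_pairwise (p : List Int → Bool) (t : List (List Int)) :
    (badIdx p t).Pairwise (· < ·) := by
  induction t with
  | nil => simp [badIdx]
  | cons r t ih =>
    simp only [badIdx]
    have hmap : ((badIdx p t).map (· + 1)).Pairwise (· < ·) :=
      (List.pairwise_map).mpr (ih.imp (by intro a b h; omega))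
    split
    · refine List.Pairwise.cons ?_ hmap
      intro x hx
      obtain ⟨y, hy, rfl⟩ := List.mem_map.mp hx
      have := badIdx_nonneg p t y hy; omega
    · exact hmap

lemma popAt_zero_cons (r : List Int) (t : List (List Int)) : popAt (r :: t) 0 = t := by
  simp [popAt, PySem.List.pop?_zero_cons]

lemma popAt_out_of_range (t : List (List Int)) (p : Int) (hp : 0 ≤ p)
    (h : ¬ p < (t.length : Int)) : popAt t p = t := by
  have : PySem.List.pop? t p = none := by
    simp [PySem.List.pop?, PySem.List.pyIdx?, hp, h]
  simp [popAt, this]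

lemma popAt_succ (r : List Int) (t : List (List Int)) (p : Int) (hp : 0 ≤ p) :
    popAt (r :: t) (p + 1) = r :: popAt t p := by
  by_cases h : p < (t.length : Int)
  · obtain ⟨n, rfl⟩ := Int.eq_ofNat_of_zero_le hp
    have hn : n < t.length := by exact_mod_cast h
    have h1 : ((n : Int) + 1) = ((n + 1 : Nat) : Int) := by push_cast; ring
    rw [popAt, popAt, h1, PySem.List.pop?_natCast t n hn,
      PySem.List.pop?_natCast (r :: t) (n + 1) (by simpa using hn)]
    simp [List.eraseIdx]
  · rw [popAt_out_of_range t p hp h,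
      popAt_out_of_range (r :: t) (p + 1) (by omega) (by simp; omega)]

-- popping shifted indices leaves the head row alone
lemma pops_shift (m : Nat) : ∀ (ps : List Int), ps.length = m →
    ∀ (r : List Int) (t : List (List Int)),
    ps.Pairwise (· < ·) → (∀ x ∈ ps, 0 ≤ x) →
    pops (r :: t) (ps.map (· + 1)) = r :: pops t ps := by
  induction m with
  | zero =>
    intro ps hlen r t _ _
    rw [List.length_eq_zero_iff.mp hlen]
    simp [pops]
  | succ m ih =>
    intro ps hlen r t hs h0
    match ps with
    | p :: ps =>
      have hp : 0 ≤ p := h0 p (by simp)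
      have htail1 : ∀ x ∈ ps, 1 ≤ x := by
        intro x hx
        have := (List.pairwise_cons.mp hs).1 x hx
        omega
      simp only [List.map_cons, pops]
      rw [popAt_succ r t p hp]
      have hcancel : (ps.map (· + 1)).map (fun x => x - 1)
          = (ps.map (fun x => x - 1)).map (· + 1) := by
        simp [List.map_map, Function.comp_def]
      rw [hcancel]
      have hs' : (ps.map (fun x => x - 1)).Pairwise (· < ·) :=
        (List.pairwise_map).mpr ((List.pairwise_cons.mp hs).2.imp (by intro a b h; omega))
      have h0' : ∀ x ∈ ps.map (fun x => x - 1), 0 ≤ x := by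
        intro x hx
        obtain ⟨y, hy, rfl⟩ := List.mem_map.mp hx
        have := htail1 y hy; omega
      have hm : ps.length = m := by simpa using hlen
      rw [ih (ps.map (fun x => x - 1)) (by simpa using hm) r (popAt t p) hs' h0']

lemma pops_badIdx (p : List Int → Bool) (t : List (List Int)) :
    pops t (badIdx p t) = t.filter (fun r => !(p r)) := by
  induction t with
  | nil => simp [pops, badIdx]
  | cons r t ih =>
    simp only [badIdx]
    by_cases hr : p r = true
    · simp only [hr, if_true]
      rw [pops, popAt_zero_cons]
      have hcancel : ((badIdx p t).map (· + 1)).map (fun x => x - 1) = badIdx p t := by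
        simp [List.map_map, Function.comp_def]
      rw [hcancel, ih]
      simp [hr]
    · simp only [Bool.not_eq_true] at hr
      simp only [hr, Bool.false_eq_true, if_false]
      rw [pops_shift (badIdx p t).length (badIdx p t) rfl r t
        (badIdx_pairwise p t) (badIdx_nonneg p t), ih]
      simp [hr]

-- the inner decrement loop is `map (· - 1)`
lemma inner_loop_eq (t : List Int) :
    (PySem.List.pyRange 0 (t.length : Int) 1).foldl
      (fun u j => PySem.List.pySetD u j (PySem.List.pyGetD u j 0 - 1)) t
    = t.map (fun x => x - 1) := by
  suffices h : ∀ (m a : Nat) (t : List Int), a + m = t.length →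
      (PySem.List.pyRange (a : Int) (t.length : Int) 1).foldl
        (fun u j => PySem.List.pySetD u j (PySem.List.pyGetD u j 0 - 1)) t
      = t.take a ++ (t.drop a).map (fun x => x - 1) by
    simpa using h t.length 0 t (by omega)
  intro m
  induction m with
  | zero =>
    intro a t ha
    have h1 : t.drop a = [] := List.drop_eq_nil_of_le (by omega)
    have h2 : t.take a = t := List.take_of_length_le (by omega)
    rw [PySem.List.pyRange_one_eq_nil (by omega), List.foldl_nil, h1, h2]
    simp
  | succ m ih =>
    intro a t ha
    have halt : a < t.length := by omega
    rw [PySem.List.pyRange_one_cons (by exact_mod_cast halt), List.foldl_cons]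
    rw [PySem.List.pyGetD_ofNat t a 0 halt, PySem.List.pySetD_natCast t a (t[a] - 1)]
    have hcast : ((a : Int) + 1) = (((a + 1 : Nat)) : Int) := by push_cast; ring
    have hlen : (t.set a (t[a] - 1)).length = t.length := by simp
    rw [hcast, ← hlen, ih (a + 1) (t.set a (t[a] - 1)) (by omega)]
    rw [List.drop_set_of_lt (by omega)]
    have htake : (t.set a (t[a] - 1)).take (a + 1) = t.take a ++ [t[a] - 1] := by
      rw [List.set_eq_take_append_cons_drop, if_pos halt, List.take_append]
      simp [Nat.min_eq_left (Nat.le_of_lt halt)]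
    rw [htake, List.drop_eq_getElem_cons halt]
    simp [List.drop_eq_getElem_cons (show a < (List.map (fun x : Int => x - 1) t).length by simpa using halt)]

lemma purgeStep_eq (st : List (List Int) × List Int) (i : Int) :
    purgeStep st i = (popAt st.1 (PySem.List.pyGetD st.2 i 0), st.2.map (fun x => x - 1)) := by
  unfold purgeStep
  rw [inner_loop_eq]

-- the outer pop loop computes `pops`
lemma outer_loop_eq (m : Nat) : ∀ (a : Nat) (tbl : List (List Int)) (tp : List Int),
    a + m = tp.length →
    ((PySem.List.pyRange (a : Int) (tp.length : Int) 1).foldl purgeStep (tbl, tp)).1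
      = pops tbl (tp.drop a) := by
  induction m with
  | zero =>
    intro a tbl tp ha
    have h1 : tp.drop a = [] := List.drop_eq_nil_of_le (by omega)
    rw [PySem.List.pyRange_one_eq_nil (by omega), List.foldl_nil, h1]
    simp [pops]
  | succ m ih =>
    intro a tbl tp ha
    have halt : a < tp.length := by omega
    rw [PySem.List.pyRange_one_cons (by exact_mod_cast halt), List.foldl_cons, purgeStep_eq]
    have hcast : ((a : Int) + 1) = (((a + 1 : Nat)) : Int) := by push_cast; ring
    have hlen : (tp.map (fun x => x - 1)).length = tp.length := by simp
    rw [hcast, ← hlen, ih (a + 1) _ _ (by simp; omega)]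
    rw [PySem.List.pyGetD_ofNat tp a 0 halt]
    rw [List.drop_eq_getElem_cons halt, pops, List.map_drop]

-- indices collected by A's first loop
lemma badIdx_eq_range (p : List Int → Bool) (t : List (List Int)) :
    badIdx p t = ((List.range t.length).filter (fun k => p (t.getD k []))).map (fun k => Int.ofNat k) := by
  induction t with
  | nil => simp [badIdx]
  | cons r t ih =>
    rw [List.length_cons, List.range_succ_eq_map, List.filter_cons, List.filter_map]
    have hcomp : ((fun k => p ((r :: t).getD k [])) ∘ Nat.succ) = fun k => p (t.getD k []) := by
      funext k; simp [Function.comp]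
    rw [hcomp]
    have hmaps : (((List.range t.length).filter (fun k => p (t.getD k []))).map Nat.succ).map (fun k => Int.ofNat k)
        = (((List.range t.length).filter (fun k => p (t.getD k []))).map (fun k => Int.ofNat k)).map (· + 1) := by
      rw [List.map_map, List.map_map]
      apply List.map_congr_left
      intro a _
      simp [Function.comp]
    by_cases hr : p r = true
    · simp only [badIdx, hr, List.getD_cons_zero, if_true, List.map_cons, hmaps, ih]
      simp
    · simp only [Bool.not_eq_true] at hr
      simp only [badIdx, hr, List.getD_cons_zero, Bool.false_eq_true, if_false, hmaps, ih]

lemma topop_eq (p : List Int → Bool) (t : List (List Int)) :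
    (PySem.List.pyRange 0 (t.length : Int) 1).filter
      (fun i => p (PySem.List.pyGetD t i [])) = badIdx p t := by
  rw [PySem.List.pyRange_zero_nat, List.filter_map, badIdx_eq_range]
  congr 1
  apply List.filter_congr
  intro k _
  simp

-- ===== VERDICT (by name: the statement is the Claim_ definition above) =====
theorem Purge_spec : Claim_equal_Purge := by
  intro table b _ _
  unfold Spec_Purge Purge Purge_alt
  rw [PySem.List.foldl_append_ite_eq_filter
    (fun i => PySem.Int.mod (PySem.List.pyGetD (PySem.List.pyGetD table i []) 1 0) (2 * b) ≠ 0)]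
  rw [PySem.List.foldl_append_ite_eq_filter
    (fun row => PySem.Int.mod (PySem.List.pyGetD row 1 0) (2 * b) = 0)]
  simp only [List.nil_append]
  set p : List Int → Bool :=
    fun row => decide (PySem.Int.mod (PySem.List.pyGetD row 1 0) (2 * b) ≠ 0) with hp
  have htop : (PySem.List.pyRange 0 (table.length : Int) 1).filter
      (fun i => decide (PySem.Int.mod (PySem.List.pyGetD (PySem.List.pyGetD table i []) 1 0) (2 * b) ≠ 0))
      = badIdx p table := by
    rw [← topop_eq p table]
  rw [htop]
  have := outer_loop_eq (badIdx p table).length 0 table (badIdx p table) (by omega)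
  simp only [Nat.cast_zero, List.drop_zero] at this
  rw [this, pops_badIdx]
  apply List.filter_congr
  intro r _
  simp [hp]
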